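-- pv_equiv track=rewrite | github.com/Fondamenti18/fondamenti-di-programmazione | students/1809541/homework04/program01.py | trovalivelli
-- ===== SOURCE A (Python) =====
-- def trovalivelli(tree,end,count):
--     arg=[]
--     for i in end[count-1]:
--         arg+=tree[i]
--     end[count]=sorted(arg)
--     if arg != []:
--         trovalivelli(tree,end,count+1)
--     if arg==[]:
--         del end[count]
--     return end
-- ===== SOURCE B (Python) =====
-- def trovalivelli(tree, end, count):
--     # Phase 1: compute all (sorted, nonempty) levels purely, starting from end[count-1].
--     frontier = sorted(x for i in end[count - 1] for x in tree[i])
--     levels = []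
--     while frontier:
--         levels.append(frontier)
--         frontier = sorted(x for i in frontier for x in tree[i])
--     # Phase 2: write the levels into end; key count+len(levels) is removed (A inserts
--     # the empty level there and deletes it).
--     j = count
--     for lvl in levels:
--         end[j] = lvl
--         j += 1
--     end.pop(j, None)
--     return end
-- ===== Notes on version B (the rewrite author's own statement) =====
-- stated objective: alternative
-- what changed: The tail recursion that mutates the dict level by level is replaced by a two-phase iteration: a pure while-loop first collects the list of sorted levels, then a single pass writes them into end and pops the key of the final empty level.
import Mathlib
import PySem

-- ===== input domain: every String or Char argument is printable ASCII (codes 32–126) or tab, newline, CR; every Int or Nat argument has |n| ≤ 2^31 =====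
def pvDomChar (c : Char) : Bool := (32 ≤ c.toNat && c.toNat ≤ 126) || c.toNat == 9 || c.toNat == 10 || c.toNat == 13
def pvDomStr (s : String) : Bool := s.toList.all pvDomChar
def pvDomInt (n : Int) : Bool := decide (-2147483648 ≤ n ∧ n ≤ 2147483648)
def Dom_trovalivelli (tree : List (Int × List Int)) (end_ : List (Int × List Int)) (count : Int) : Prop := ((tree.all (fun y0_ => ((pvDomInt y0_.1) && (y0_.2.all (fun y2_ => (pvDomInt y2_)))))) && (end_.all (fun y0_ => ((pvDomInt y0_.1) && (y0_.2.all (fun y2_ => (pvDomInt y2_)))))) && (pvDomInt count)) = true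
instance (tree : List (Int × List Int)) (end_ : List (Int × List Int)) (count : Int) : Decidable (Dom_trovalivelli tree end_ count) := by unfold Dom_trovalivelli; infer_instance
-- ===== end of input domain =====

-- B replaces A's dict-mutating tail recursion by a two-phase iteration (collect the sorted
-- levels purely, then write them into end); equivalence proved about the RETURN value (both
-- Pythons mutate end the same way on the admitted inputs).


-- ===== PORT A =====
-- A's recursion, made total by a fuel counter (never exhausted under Pre_, see below).
def trovArec (tree : PySem.Dict Int (List Int)) : Nat → PySem.Dict Int (List Int) → Int → PySem.Dict Int (List Int)
  | 0, e, _ => e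
  | f + 1, e, count =>
    let arg := (e.getD (count - 1) []).foldl (fun a i => a ++ tree.getD i []) []
    let e1 := e.insert count (PySem.List.sorted arg (fun x => x) false)
    if arg ≠ [] then trovArec tree f e1 (count + 1)
    else e1.erase count

def trovalivelli (tree : List (Int × List Int)) (end_ : List (Int × List Int)) (count : Int) : List (Int × List Int) :=
  (trovArec (PySem.Dict.mk tree) (tree.length + 2) (PySem.Dict.mk end_) count).items

-- ===== PORT B =====
-- sorted(x for i in front for x in tree[i])
def pvNextLevel (tree : PySem.Dict Int (List Int)) (front : List Int) : List Int :=
  PySem.List.sorted (front.flatMap (fun i => tree.getD i [])) (fun x => x) false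

-- B's while-loop collecting the nonempty levels (same fuel guard as A's port).
def pvLevels (tree : PySem.Dict Int (List Int)) : Nat → List Int → List (List Int)
  | 0, _ => []
  | f + 1, front => if front = [] then [] else front :: pvLevels tree f (pvNextLevel tree front)

-- B's write-back loop: end[j] = lvl; j += 1.
def pvInsertLevels (e : PySem.Dict Int (List Int)) (j : Int) (levels : List (List Int)) :
    PySem.Dict Int (List Int) × Int :=
  levels.foldl (fun p lvl => (p.1.insert p.2 lvl, p.2 + 1)) (e, j)

def trovalivelli_alt (tree : List (Int × List Int)) (end_ : List (Int × List Int)) (count : Int) : List (Int × List Int) :=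
  let t := PySem.Dict.mk tree
  let e := PySem.Dict.mk end_
  let front := pvNextLevel t (e.getD (count - 1) [])
  let levels := pvLevels t (tree.length + 2) front
  let p := pvInsertLevels e count levels
  (p.1.erase p.2).items

-- ===== PRECONDITION & SPEC =====
-- Pre_ excludes exactly the inputs on which the Python A does not return a value: a missing
-- key end[count-1] or a node reached by the walk but missing from tree (KeyError), and a
-- cycle reachable from end[count-1] (unbounded recursion). The certificate is a set R of
-- tree keys that contains the start level, is closed under the child lists, and is acyclic
-- (every nonempty subset has a node with no child in it) — such an R exists precisely when
-- the walk stays inside the keys and terminates; the nodup conjuncts hold for every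
-- argument that comes from a Python dict.
def Pre_trovalivelli (tree : List (Int × List Int)) (end_ : List (Int × List Int)) (count : Int) : Prop :=
  (tree.map Prod.fst).Nodup ∧ (end_.map Prod.fst).Nodup ∧
  ∃ p ∈ end_, p.1 = Int.pred count ∧
  ∃ R ∈ (tree.map Prod.fst).sublists, (∀ i ∈ p.2, i ∈ R) ∧
    (∀ q ∈ tree, q.1 ∈ R → ∀ v ∈ q.2, v ∈ R) ∧
    (∀ C ∈ R.sublists, C ≠ [] → ∃ v ∈ C, ∀ q ∈ tree, q.1 = v → ∀ w ∈ q.2, w ∉ C)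
instance (tree : List (Int × List Int)) (end_ : List (Int × List Int)) (count : Int) : Decidable (Pre_trovalivelli tree end_ count) := by unfold Pre_trovalivelli; infer_instance

def pvWitness_trovalivelli : (List (Int × List Int)) × (List (Int × List Int)) × Int :=
  ([(1, [2]), (2, [])], [(0, [1])], 1)

def Spec_trovalivelli (tree : List (Int × List Int)) (end_ : List (Int × List Int)) (count : Int) (out : List (Int × List Int)) : Prop := out = trovalivelli_alt tree end_ count
instance (tree : List (Int × List Int)) (end_ : List (Int × List Int)) (count : Int) (out : List (Int × List Int)) : Decidable (Spec_trovalivelli tree end_ count out) := by unfold Spec_trovalivelli; infer_instance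

-- ===== CLAIM (what is proved, stated in full; the proofs are below) =====
def Claim_equal_trovalivelli : Prop := ∀ (tree : List (Int × List Int)) (end_ : List (Int × List Int)) (count : Int), Dom_trovalivelli tree end_ count → Pre_trovalivelli tree end_ count → Spec_trovalivelli tree end_ count (trovalivelli tree end_ count)

-- ===== LEMMAS AND PROOFS =====

-- deleting the key just inserted = deleting it from the original dict
lemma pv_erase_insert_self {κ ν : Type} [BEq κ] [LawfulBEq κ] (d : PySem.Dict κ ν) (k : κ) (v : ν) :
    (d.insert k v).erase k = d.erase k := by
  apply PySem.Dict.ext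
  simp only [PySem.Dict.insert, PySem.Dict.erase]
  split
  · induction d.items with
    | nil => rfl
    | cons p l ih =>
      by_cases h : p.1 == k
      · simp [h, ih]
      · simp [h] at ih ⊢
        exact ih
  · simp

-- the closure and acyclicity certificates, read on the Dict
def pvClosed (t : PySem.Dict Int (List Int)) (R : List Int) : Prop :=
  ∀ q ∈ t.items, q.1 ∈ R → ∀ v ∈ q.2, v ∈ R

def pvAcyc (t : PySem.Dict Int (List Int)) (R : List Int) : Prop :=
  ∀ C, C.Sublist R → C ≠ [] → ∃ v ∈ C, ∀ w ∈ t.getD v [], w ∉ C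

lemma pv_child_mem {t : PySem.Dict Int (List Int)} {R : List Int} (hcl : pvClosed t R)
    {i : Int} (hi : i ∈ R) : ∀ w ∈ t.getD i [], w ∈ R := by
  intro w hw
  unfold PySem.Dict.getD at hw
  cases hq : t.get? i with
  | none => rw [hq] at hw; simp at hw
  | some vs =>
    rw [hq] at hw
    exact hcl _ (PySem.Dict.mem_items_of_get?_eq_some t hq) hi w hw

-- from the subset-sink certificate, a rank function along which every edge strictly drops
lemma pv_rank_exists (t : PySem.Dict Int (List Int)) :
    ∀ (n : Nat) (R : List Int), R.length ≤ n → pvAcyc t R →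
      ∃ rk : Int → Nat, (∀ v ∈ R, rk v < R.length) ∧
        (∀ u ∈ R, ∀ w ∈ t.getD u [], w ∈ R → rk w < rk u) := by
  intro n
  induction n with
  | zero =>
    intro R hlen _
    have hR0 : R = [] := List.length_eq_zero_iff.mp (by omega)
    subst hR0
    exact ⟨fun _ => 0, by simp, by simp⟩
  | succ m ih =>
    intro R hlen hac
    by_cases hR : R = []
    · subst hR; exact ⟨fun _ => 0, by simp, by simp⟩
    · rcases hac R (List.Sublist.refl R) hR with ⟨v, hv, hsink⟩
      have hlen' : (R.erase v).length = R.length - 1 := List.length_erase_of_mem hv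
      have hlt : (R.erase v).length ≤ m := by
        have := List.length_pos_of_mem hv; omega
      have hac' : pvAcyc t (R.erase v) := by
        intro C hC hne
        exact hac C (hC.trans List.erase_sublist) hne
      rcases ih (R.erase v) hlt hac' with ⟨rk', hb', he'⟩
      refine ⟨fun x => if x = v then 0 else rk' x + 1, ?_, ?_⟩
      · intro x hx
        by_cases hxv : x = v
        · simp [hxv]; exact List.length_pos_of_mem hv
        · have hx' : x ∈ R.erase v := (List.mem_erase_of_ne hxv).mpr hx
          have := hb' x hx'
          simp only [if_neg hxv]
          omega
      · intro u hu w hw hwR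
        by_cases huv : u = v
        · exact absurd hwR (hsink w (huv ▸ hw))
        · have hu' : u ∈ R.erase v := (List.mem_erase_of_ne huv).mpr hu
          by_cases hwv : w = v
          · simp [hwv, huv]
          · have hw' : w ∈ R.erase v := (List.mem_erase_of_ne hwv).mpr hwR
            have := he' u hu' w hw hw'
            simp only [if_neg huv, if_neg hwv]
            omega

-- max of the ranks over a frontier
def pvMax (rk : Int → Nat) (l : List Int) : Nat := l.foldr (fun v m => max (rk v) m) 0

lemma pvMax_le {rk : Int → Nat} {l : List Int} : ∀ v ∈ l, rk v ≤ pvMax rk l := by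
  induction l with
  | nil => simp
  | cons x xs ih =>
    intro v hv
    rcases List.mem_cons.mp hv with h | h
    · subst h; simp [pvMax]
    · have := ih v h
      simp only [pvMax, List.foldr] at *
      omega

lemma pvMax_lt {rk : Int → Nat} {l : List Int} {B : Nat} (hne : l ≠ [])
    (hall : ∀ v ∈ l, rk v < B) : pvMax rk l < B := by
  induction l with
  | nil => exact absurd rfl hne
  | cons x xs ih =>
    by_cases hxs : xs = []
    · subst hxs
      simpa [pvMax] using hall x (by simp)
    · have h1 := hall x (by simp)
      have h2 := ih hxs (fun v hv => hall v (List.mem_cons_of_mem _ hv))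
      simp only [pvMax, List.foldr] at *
      omega

lemma pv_next_sub {t : PySem.Dict Int (List Int)} {R : List Int} (hcl : pvClosed t R)
    {front : List Int} (hfr : ∀ v ∈ front, v ∈ R) :
    ∀ w ∈ pvNextLevel t front, ∃ i ∈ front, w ∈ t.getD i [] ∧ w ∈ R := by
  intro w hw
  unfold pvNextLevel at hw
  rw [PySem.List.mem_sorted] at hw
  rcases List.mem_flatMap.mp hw with ⟨i, hi, hwi⟩
  exact ⟨i, hi, hwi, pv_child_mem hcl (hfr i hi) w hwi⟩

lemma pv_levels_nil (t : PySem.Dict Int (List Int)) (fuel : Nat) : pvLevels t fuel [] = [] := by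
  cases fuel with
  | zero => rfl
  | succ f => simp [pvLevels]

-- the level count is bounded by the max rank of the frontier
lemma pv_levels_le_max {t : PySem.Dict Int (List Int)} {R : List Int} (hcl : pvClosed t R)
    {rk : Int → Nat} (hrk : ∀ u ∈ R, ∀ w ∈ t.getD u [], w ∈ R → rk w < rk u) :
    ∀ (fuel : Nat) (front : List Int), (∀ v ∈ front, v ∈ R) →
      (pvLevels t fuel front).length ≤ pvMax rk front + 1 := by
  intro fuel
  induction fuel with
  | zero => intro front _; simp [pvLevels]
  | succ f ih =>
    intro front hfr
    by_cases hne : front = []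
    · simp [pvLevels, hne]
    · simp only [pvLevels, if_neg hne, List.length_cons]
      by_cases hnx : pvNextLevel t front = []
      · rw [hnx, pv_levels_nil]; simp
      · have hsub : ∀ v ∈ pvNextLevel t front, v ∈ R :=
          fun v hv => ((pv_next_sub hcl hfr v hv).choose_spec).2.2
        have hdrop : ∀ w ∈ pvNextLevel t front, rk w < pvMax rk front := by
          intro w hw
          rcases pv_next_sub hcl hfr w hw with ⟨i, hi, hwi, hwR⟩
          have h1 := hrk i (hfr i hi) w hwi hwR
          have h2 : rk i ≤ pvMax rk front := pvMax_le i hi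
          omega
        have hMlt : pvMax rk (pvNextLevel t front) < pvMax rk front := pvMax_lt hnx hdrop
        have hrec := ih (pvNextLevel t front) hsub
        omega

-- the bridge: A's fueled recursion equals B's collect-then-write while fuel lasts
lemma pv_bridge (t : PySem.Dict Int (List Int)) :
    ∀ (fuel : Nat) (e : PySem.Dict Int (List Int)) (count : Int) (front : List Int),
      front = pvNextLevel t (e.getD (count - 1) []) →
      (pvLevels t fuel front).length < fuel →
      trovArec t fuel e count =
        (pvInsertLevels e count (pvLevels t fuel front)).1.erase
          (pvInsertLevels e count (pvLevels t fuel front)).2 := by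
  intro fuel
  induction fuel with
  | zero => intro e count front _ h; simp at h
  | succ f ih =>
    intro e count front hfr hlen
    have hsa : PySem.List.sorted ((e.getD (count - 1) []).foldl (fun a i => a ++ t.getD i []) []) (fun x => x) false = front := by
      rw [hfr]; unfold pvNextLevel
      rw [PySem.List.foldl_append_eq_flatMap]
      simp
    by_cases hnil : (e.getD (count - 1) []).foldl (fun a i => a ++ t.getD i []) [] = []
    · have hfr0 : front = [] := by
        rw [← hsa, hnil]; rfl
      have hL : pvLevels t (f + 1) front = [] := by
        rw [hfr0]; simp [pvLevels]
      rw [hL]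
      simp only [trovArec, hnil, ne_eq, not_true_eq_false, if_false, pvInsertLevels,
        List.foldl_nil]
      exact pv_erase_insert_self e count []
    · have hfr_ne : front ≠ [] := by
        rw [← hsa]
        simpa [PySem.List.sorted_eq_nil_iff] using hnil
      have hstep : pvLevels t (f + 1) front = front :: pvLevels t f (pvNextLevel t front) := by
        simp [pvLevels, hfr_ne]
      have hlen' : (pvLevels t f (pvNextLevel t front)).length < f := by
        rw [hstep] at hlen; simpa using hlen
      have hfr' : pvNextLevel t front = pvNextLevel t ((e.insert count front).getD (count + 1 - 1) []) := by
        have hc : count + 1 - 1 = count := by ring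
        rw [hc, PySem.Dict.getD_insert_self]
      have hrec := ih (e.insert count front) (count + 1) (pvNextLevel t front) hfr' hlen'
      simp only [trovArec, hnil, ne_eq, not_false_eq_true, if_true, hsa]
      rw [hstep]
      simpa [pvInsertLevels] using hrec

-- ===== VERDICT (by name: the statement is the Claim_ definition above) =====
theorem trovalivelli_spec : Claim_equal_trovalivelli := by
  unfold Claim_equal_trovalivelli
  intro tree end_ count _ hpre
  obtain ⟨hndt, hnde, p, hp, hpk0, R, hRmem, hLR, hclosed, hacyc⟩ := hpre
  have hpk : p.1 = count - 1 := by rw [hpk0]; rfl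
  unfold Spec_trovalivelli trovalivelli trovalivelli_alt
  set t := PySem.Dict.mk tree with ht
  set e := PySem.Dict.mk end_ with he
  have hRsub : R.Sublist (tree.map Prod.fst) := List.mem_sublists.mp hRmem
  have hcl : pvClosed t R := by
    intro q hq hqR v hv
    exact hclosed q hq hqR v hv
  have hac : pvAcyc t R := by
    intro C hC hne
    rcases hacyc C (List.mem_sublists.mpr hC) hne with ⟨v, hv, hs⟩
    refine ⟨v, hv, ?_⟩
    intro w hw
    unfold PySem.Dict.getD at hw
    cases hg : t.get? v with
    | none => rw [hg] at hw; simp at hw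
    | some vs =>
      rw [hg] at hw
      exact hs (v, vs) (PySem.Dict.mem_items_of_get?_eq_some t hg) rfl w hw
  have hgetL : e.getD (count - 1) [] = p.2 := by
    have hmem : (count - 1, p.2) ∈ e.items := by
      show (count - 1, p.2) ∈ end_
      have : p = (count - 1, p.2) := by rw [← hpk]
      rw [← this]; exact hp
    exact PySem.Dict.getD_of_mem_items e hmem hnde []
  have hfr0 : ∀ v ∈ pvNextLevel t (e.getD (count - 1) []), v ∈ R := by
    intro v hv
    refine ((pv_next_sub hcl ?_ v hv).choose_spec).2.2
    rw [hgetL]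
    exact hLR
  rcases pv_rank_exists t R.length R le_rfl hac with ⟨rk, hbnd, hdec⟩
  have hRlen : R.length ≤ tree.length := by
    have := hRsub.length_le
    simpa using this
  have hlen : (pvLevels t (tree.length + 2) (pvNextLevel t (e.getD (count - 1) []))).length < tree.length + 2 := by
    by_cases hne : pvNextLevel t (e.getD (count - 1) []) = []
    · rw [hne, pv_levels_nil]; simp
    · have hbd := pv_levels_le_max hcl hdec (tree.length + 2) _ hfr0
      have hmx : pvMax rk (pvNextLevel t (e.getD (count - 1) [])) < R.length :=
        pvMax_lt hne (fun v hv => hbnd v (hfr0 v hv))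
      omega
  rw [pv_bridge t (tree.length + 2) e count _ rfl hlen]
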